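-- pv_equiv track=rewrite | github.com/sundar91/dsa | PatternMatching/closest-palindrome.py | solve
-- ===== SOURCE A (Python) =====
-- def solve(A):
--     s = A
--     j = len(s)
--     l = j
--     j = j - 1
--     count = 0
--     i = 0
--     ans = ""
--     sr = ""
--     for x in s:
--         sr = x + sr
--
--     # if string is already a palindrome, for even we need to change two characters
--     if s == sr:
--         if l % 2 == 1:
--             ans = "YES"
--         else:
--             ans = "NO"
--     else:
--         while i <= j:
--             if s[i] != s[j]:
--                 count += 1
--             i += 1
--             j -= 1
--         if count > 1:
--             ans = "NO"
--         else:
--             ans = "YES"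
--
--     return ans
-- ===== SOURCE B (Python) =====
-- def solve(A):
--     # Two-pointer state machine with early exit: walk inward, allowing at most one
--     # mismatched pair (tracked by 'edited'); succeed at the end if an edit was made
--     # or the pointers met on a middle character.
--     l, r, edited = 0, len(A) - 1, False
--     while l < r:
--         if A[l] != A[r]:
--             if edited:
--                 return "NO"
--             edited = True
--         l += 1
--         r -= 1
--     return "YES" if edited or l == r else "NO"
-- ===== Notes on version B (the rewrite author's own statement) =====
-- stated objective: faster
-- what changed: B replaces A's quadratic reversed-string build, palindrome equality test and full mismatch-counting loop with a single two-pointer state machine that tracks one boolean 'edited' flag and returns early on the second mismatch, deciding YES at the end from the flag or pointers meeting on a middle character (no count, no parity arithmetic, no reversed string).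
import Mathlib
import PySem

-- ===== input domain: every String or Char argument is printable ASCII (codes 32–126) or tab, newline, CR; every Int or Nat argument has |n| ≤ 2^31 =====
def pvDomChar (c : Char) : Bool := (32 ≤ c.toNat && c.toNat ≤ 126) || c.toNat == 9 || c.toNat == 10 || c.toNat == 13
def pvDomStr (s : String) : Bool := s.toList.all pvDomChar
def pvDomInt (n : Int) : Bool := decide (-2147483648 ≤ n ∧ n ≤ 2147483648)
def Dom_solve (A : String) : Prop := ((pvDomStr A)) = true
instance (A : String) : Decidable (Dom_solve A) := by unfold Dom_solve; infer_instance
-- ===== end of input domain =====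

-- B replaces A's reversed-string build + palindrome test + counting loop by one
-- two-pointer state machine with an 'edited' flag and early exit (objective: faster).

-- ===== PORT A =====
-- the while loop: while i <= j: if s[i] != s[j]: count += 1; i += 1; j -= 1
def solveLoop (s : List Char) (i j count : Int) : Int :=
  if i ≤ j then
    solveLoop s (i + 1) (j - 1)
      (if PySem.List.pyGet? s i ≠ PySem.List.pyGet? s j then count + 1 else count)
  else count
termination_by (j + 1 - i).toNat
decreasing_by omega

def solve (A : String) : String :=
  let s := A.toList
  let l : Int := s.length
  let j : Int := l - 1
  -- for x in s: sr = x + sr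
  let sr := s.foldl (fun acc x => x :: acc) ([] : List Char)
  if s = sr then
    (if l % 2 = 1 then "YES" else "NO")
  else if solveLoop s 0 j 0 > 1 then "NO" else "YES"

-- ===== PORT B =====
-- the while loop of B: walk inward with an 'edited' flag, early "NO" on a second mismatch
def goAlt (s : List Char) (l r : Int) (edited : Bool) : String :=
  if l < r then
    if PySem.List.pyGet? s l ≠ PySem.List.pyGet? s r then
      if edited then "NO" else goAlt s (l + 1) (r - 1) true
    else goAlt s (l + 1) (r - 1) edited
  else if edited = true ∨ l = r then "YES" else "NO"
termination_by (r - l).toNat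
decreasing_by all_goals omega

def solve_alt (A : String) : String :=
  goAlt A.toList 0 ((A.toList.length : Int) - 1) false

-- ===== PRECONDITION & SPEC =====
def Spec_solve (A : String) (out : String) : Prop := out = solve_alt A
instance (A : String) (out : String) : Decidable (Spec_solve A out) := by unfold Spec_solve; infer_instance

-- ===== CLAIM (what is proved, stated in full; the proofs are below) =====
def Claim_equal_solve : Prop := ∀ (A : String), Dom_solve A → Spec_solve A (solve A)

-- ===== LEMMAS AND PROOFS =====

-- canonical result: mismatch count M over the first half, edit flag, length n
def canon (M : Nat) (edited : Bool) (n : Nat) : String :=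
  if edited then (if M = 0 then "YES" else "NO")
  else if M = 0 then (if n % 2 = 1 then "YES" else "NO")
  else if M = 1 then "YES" else "NO"

lemma foldl_cons_eq_reverse_append (s acc : List Char) :
    s.foldl (fun acc x => x :: acc) acc = s.reverse ++ acc := by
  induction s generalizing acc with
  | nil => simp
  | cons x xs ih => simp [List.foldl, ih]

lemma solveLoop_eq (s : List Char) :
    ∀ m i c, (s.length + 1) / 2 - i = m →
      solveLoop s i ((s.length : Int) - 1 - i) c =
        c + ((List.range' i m).countP
              (fun k => decide (s[k]? ≠ s[s.length - 1 - k]?)) : Int) := by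
  intro m
  induction m with
  | zero =>
    intro i c hm
    rw [solveLoop]
    have : ¬ ((i : Int) ≤ (s.length : Int) - 1 - i) := by omega
    simp [this]
  | succ m ih =>
    intro i c hm
    rw [solveLoop]
    have hle : ((i : Int) ≤ (s.length : Int) - 1 - i) := by omega
    have hi : i < s.length := by omega
    rw [if_pos hle]
    have hj : ((s.length : Int) - 1 - i) = ((s.length - 1 - i : Nat) : Int) := by omega
    rw [hj]
    have step : ((s.length - 1 - i : Nat) : Int) - 1 = (s.length : Int) - 1 - ((i + 1 : Nat) : Int) := by
      push_cast; omega
    have hcast : ((i : Int) + 1) = ((i + 1 : Nat) : Int) := by push_cast; ring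
    rw [step, PySem.List.pyGet?_natCast, PySem.List.pyGet?_natCast, hcast,
        ih (i + 1) _ (by omega)]
    rw [List.range'_succ, List.countP_cons]
    by_cases h : s[i]? ≠ s[s.length - 1 - i]? <;> simp [h] <;> ring

lemma half_count (s : List Char) :
    (List.range ((s.length + 1) / 2)).countP
        (fun k => decide (s[k]? ≠ s[s.length - 1 - k]?)) =
      (List.range (s.length / 2)).countP
        (fun k => decide (s[k]? ≠ s[s.length - 1 - k]?)) := by
  rcases Nat.even_or_odd s.length with ⟨k, hk⟩ | ⟨k, hk⟩
  · have : (s.length + 1) / 2 = s.length / 2 := by omega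
    rw [this]
  · have h1 : (s.length + 1) / 2 = s.length / 2 + 1 := by omega
    have hmid : s.length - 1 - s.length / 2 = s.length / 2 := by omega
    rw [h1, List.range_succ, List.countP_append]
    simp [hmid]

lemma pal_iff (s : List Char) :
    s = s.reverse ↔
      (List.range (s.length / 2)).countP
        (fun k => decide (s[k]? ≠ s[s.length - 1 - k]?)) = 0 := by
  rw [List.countP_eq_zero]
  constructor
  · intro hp k hk
    simp only [List.mem_range] at hk
    have hk' : k < s.length := by omega
    have : s.reverse[k]? = s[s.length - 1 - k]? := by
      rw [List.getElem?_reverse hk']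
    simp [← hp] at this
    simp [this]
  · intro h
    have h' : ∀ k, k < s.length / 2 → s[k]? = s[s.length - 1 - k]? := by
      intro k hk
      have := h k (by simpa using hk)
      simpa using this
    apply List.ext_getElem?
    intro i
    by_cases hi : i < s.length
    · rw [List.getElem?_reverse hi]
      rcases Nat.lt_or_ge i (s.length / 2) with hlt | hge
      · exact h' i hlt
      · by_cases hmid : s.length - 1 - i = i
        · rw [hmid]
        · have hk : s.length - 1 - i < s.length / 2 := by omega
          have := h' _ hk
          have hii : s.length - 1 - (s.length - 1 - i) = i := by omega
          rw [hii] at this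
          exact this.symm
    · rw [List.getElem?_eq_none (by simpa using Nat.le_of_not_lt hi),
          List.getElem?_eq_none]
      simpa using Nat.le_of_not_lt hi

lemma goAlt_eq (s : List Char) :
    ∀ m i edited, i ≤ s.length / 2 → s.length / 2 - i = m →
      goAlt s i ((s.length : Int) - 1 - i) edited =
        canon ((List.range' i m).countP
                (fun k => decide (s[k]? ≠ s[s.length - 1 - k]?))) edited s.length := by
  intro m
  induction m with
  | zero =>
    intro i edited hle hm
    have hi : i = s.length / 2 := by omega
    rw [goAlt]
    have hnl : ¬ ((i : Int) < (s.length : Int) - 1 - i) := by omega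
    rw [if_neg hnl]
    simp only [List.range'_zero, List.countP_nil, canon]
    have hiffl : ((i : Int) = (s.length : Int) - 1 - i) ↔ s.length % 2 = 1 := by omega
    cases edited with
    | true => simp
    | false =>
      by_cases ho : s.length % 2 = 1
      · rw [if_pos (Or.inr (hiffl.mpr ho))]; simp [ho]
      · have hno : ¬ ((false = true) ∨ (i : Int) = (s.length : Int) - 1 - i) := by
          rintro (h | h)
          · exact Bool.false_ne_true h
          · exact ho (hiffl.mp h)
        rw [if_neg hno]; simp [ho]
  | succ m ih =>
    intro i edited hle hm
    rw [goAlt]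
    have hlt : ((i : Int) < (s.length : Int) - 1 - i) := by omega
    rw [if_pos hlt]
    have hi : i < s.length := by omega
    have hj : ((s.length : Int) - 1 - i) = ((s.length - 1 - i : Nat) : Int) := by omega
    have step : ((s.length - 1 - i : Nat) : Int) - 1 = (s.length : Int) - 1 - ((i + 1 : Nat) : Int) := by
      push_cast; omega
    have hcast : ((i : Int) + 1) = ((i + 1 : Nat) : Int) := by push_cast; ring
    rw [hj, PySem.List.pyGet?_natCast, PySem.List.pyGet?_natCast,
        List.range'_succ, List.countP_cons]
    by_cases h : s[i]? ≠ s[s.length - 1 - i]?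
    · rw [if_pos h]
      have h1 : (if (decide (s[i]? ≠ s[s.length - 1 - i]?)) = true then 1 else 0) = 1 := by
        simp [h]
      rw [h1]
      cases edited with
      | true =>
        rw [if_pos rfl]
        generalize (List.range' (i + 1) m).countP
            (fun k => decide (s[k]? ≠ s[s.length - 1 - k]?)) = c
        simp [canon]
      | false =>
        rw [if_neg (by simp), hcast, step, ih (i + 1) true (by omega) (by omega)]
        generalize (List.range' (i + 1) m).countP
            (fun k => decide (s[k]? ≠ s[s.length - 1 - k]?)) = c
        by_cases hc : c = 0
        · simp [canon, hc]
        · have hone : c + 1 ≠ 1 := by omega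
          simp [canon, hc, hone]
    · have h0 : (if (decide (s[i]? ≠ s[s.length - 1 - i]?)) = true then 1 else 0) = 0 := by
        simp [h]
      rw [if_neg h, h0, hcast, step, ih (i + 1) edited (by omega) (by omega)]
      simp

-- ===== VERDICT (by name: the statement is the Claim_ definition above) =====
theorem solve_spec : Claim_equal_solve := by
  intro A _
  unfold Spec_solve solve solve_alt
  simp only [foldl_cons_eq_reverse_append, List.append_nil]
  set s := A.toList with hs
  set M := (List.range (s.length / 2)).countP
      (fun k => decide (s[k]? ≠ s[s.length - 1 - k]?)) with hM
  have hB : goAlt s 0 ((s.length : Int) - 1) false = canon M false s.length := by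
    have := goAlt_eq s (s.length / 2) 0 false (by omega) (by omega)
    rw [← List.range_eq_range', ← hM] at this
    simpa using this
  have hloop : solveLoop s 0 ((s.length : Int) - 1) 0 = (M : Int) := by
    have := solveLoop_eq s ((s.length + 1) / 2) 0 0 (by omega)
    rw [← List.range_eq_range', half_count s, ← hM] at this
    simpa using this
  rw [hB]
  by_cases hp : s = s.reverse
  · have hM0 : M = 0 := (pal_iff s).mp hp
    have hpar : ((s.length : Int) % 2 = 1) ↔ (s.length % 2 = 1) := by omega
    rw [if_pos hp, hM0]
    by_cases ho : s.length % 2 = 1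
    · rw [if_pos (hpar.mpr ho)]; simp [canon, ho]
    · rw [if_neg (fun h => ho (hpar.mp h))]; simp [canon, ho]
  · have hM0 : M ≠ 0 := fun h => hp ((pal_iff s).mpr h)
    rw [if_neg hp, hloop]
    by_cases h1 : M = 1
    · rw [if_neg (by omega), h1]; simp [canon]
    · rw [if_pos (by omega)]; simp [canon, hM0, h1]
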